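-- pv_equiv track=rewrite | github.com/VIRA-LAU/ai-dashboard-service | utils/handle_db/stats_handler.py | populateTeamLists
-- ===== SOURCE A (Python) =====
-- def populateTeamLists(player_ids: list, team1: list, team2: list) -> tuple[dict, dict]:
--     team1_player_scores = {}
--     team2_player_scores = {}
--     for player in player_ids:
--         if player in team1:
--             team1_player_scores[f'player_{player}'] = {
--                 'scored': 0,
--                 'missed': 0
--             }
--         elif player in team2:
--             team2_player_scores[f'player_{player}'] = {
--                 'scored': 0,
--                 'missed': 0
--             }
--     return team1_player_scores, team2_player_scores
-- ===== SOURCE B (Python) =====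
-- def populateTeamLists(player_ids: list, team1: list, team2: list) -> tuple[dict, dict]:
--     # Stage 1: classify player_ids against set indices of the rosters.
--     t1 = set(team1)
--     t2 = set(team2)
--     # Stage 2: ordered-deduplicated key lists (dict.fromkeys keeps first occurrences).
--     keys1 = dict.fromkeys('player_%d' % p for p in player_ids if p in t1)
--     keys2 = dict.fromkeys('player_%d' % p for p in player_ids if p in t2 and p not in t1)
--     # Stage 3: build each dict with an unconditional loop over its distinct keys.
--     team1_player_scores = {}
--     for k in keys1:
--         team1_player_scores[k] = {'scored': 0, 'missed': 0}
--     team2_player_scores = {}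
--     for k in keys2:
--         team2_player_scores[k] = {'scored': 0, 'missed': 0}
--     return team1_player_scores, team2_player_scores
-- ===== Notes on version B (the rewrite author's own statement) =====
-- stated objective: faster
-- what changed: Replaces A's single elif-loop that conditionally inserts into two dict accumulators (relying on dict overwrite for duplicates) by a staged pipeline: classify against set indices of the rosters (O(1) membership instead of an O(|team|) list scan), build ordered-deduplicated key lists with dict.fromkeys, then fill each dict with an unconditional loop over its distinct keys.
import Mathlib
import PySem

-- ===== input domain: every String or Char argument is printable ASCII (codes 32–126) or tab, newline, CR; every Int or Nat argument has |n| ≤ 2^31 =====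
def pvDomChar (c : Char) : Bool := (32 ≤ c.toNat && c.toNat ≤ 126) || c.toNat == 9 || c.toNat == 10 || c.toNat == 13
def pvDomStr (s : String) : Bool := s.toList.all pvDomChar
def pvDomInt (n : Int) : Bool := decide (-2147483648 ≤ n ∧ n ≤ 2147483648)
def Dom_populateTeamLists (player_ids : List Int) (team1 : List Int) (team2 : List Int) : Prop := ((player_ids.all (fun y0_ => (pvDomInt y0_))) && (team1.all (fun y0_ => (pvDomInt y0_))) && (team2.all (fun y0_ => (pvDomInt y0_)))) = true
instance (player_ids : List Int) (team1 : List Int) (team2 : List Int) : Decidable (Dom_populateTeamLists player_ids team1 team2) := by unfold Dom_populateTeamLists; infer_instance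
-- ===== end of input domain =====

-- B replaces A's single elif-loop with two dict accumulators by a staged pipeline:
-- classify against roster sets, dedup the key lists (dict.fromkeys), then fill each
-- dict unconditionally over its distinct keys (objective: faster — set membership replaces list scans).

-- ===== PORT A =====
def pvScore : List (String × Int) := [("scored", 0), ("missed", 0)]

def populateTeamLists (player_ids : List Int) (team1 : List Int) (team2 : List Int) : (List (String × List (String × Int))) × (List (String × List (String × Int))) :=
  let r := player_ids.foldl
    (fun (acc : PySem.Dict String (List (String × Int)) × PySem.Dict String (List (String × Int))) player =>
      if team1.contains player then
        (acc.1.insert ("player_" ++ PySem.Int.toStr player) pvScore, acc.2)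
      else if team2.contains player then
        (acc.1, acc.2.insert ("player_" ++ PySem.Int.toStr player) pvScore)
      else acc)
    (PySem.Dict.empty, PySem.Dict.empty)
  (r.1.items, r.2.items)

-- ===== PORT B =====
def populateTeamLists_alt (player_ids : List Int) (team1 : List Int) (team2 : List Int) : (List (String × List (String × Int))) × (List (String × List (String × Int))) :=
  let t1 : PySem.Set Int := PySem.Set.ofList team1
  let t2 : PySem.Set Int := PySem.Set.ofList team2
  let keys1 := PySem.List.dedup ((player_ids.filter (fun p => PySem.Set.contains t1 p)).map (fun p => "player_" ++ PySem.Int.toStr p))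
  let keys2 := PySem.List.dedup ((player_ids.filter (fun p => PySem.Set.contains t2 p && !PySem.Set.contains t1 p)).map (fun p => "player_" ++ PySem.Int.toStr p))
  let d1 := keys1.foldl (fun (d : PySem.Dict String (List (String × Int))) k => d.insert k pvScore) PySem.Dict.empty
  let d2 := keys2.foldl (fun (d : PySem.Dict String (List (String × Int))) k => d.insert k pvScore) PySem.Dict.empty
  (d1.items, d2.items)

-- ===== PRECONDITION & SPEC =====
def Spec_populateTeamLists (player_ids : List Int) (team1 : List Int) (team2 : List Int) (out : (List (String × List (String × Int))) × (List (String × List (String × Int)))) : Prop := out = populateTeamLists_alt player_ids team1 team2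
instance (player_ids : List Int) (team1 : List Int) (team2 : List Int) (out : (List (String × List (String × Int))) × (List (String × List (String × Int)))) : Decidable (Spec_populateTeamLists player_ids team1 team2 out) := by unfold Spec_populateTeamLists; infer_instance

-- ===== CLAIM (what is proved, stated in full; the proofs are below) =====
def Claim_equal_populateTeamLists : Prop := ∀ (player_ids : List Int) (team1 : List Int) (team2 : List Int), Dom_populateTeamLists player_ids team1 team2 → Spec_populateTeamLists player_ids team1 team2 (populateTeamLists player_ids team1 team2)

-- ===== LEMMAS AND PROOFS =====

-- set(team) membership agrees with list membership
theorem pv_setContains_ofList (xs : List Int) (p : Int) :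
    PySem.Set.contains (PySem.Set.ofList xs) p = xs.contains p := by
  simp [PySem.Set.contains_eq_listContains, List.contains_eq_mem, PySem.Set.mem_ofList]

-- A's one loop over two accumulators splits into two independent conditional folds
theorem pv_loop_split (t1 t2 : List Int) (player_ids : List Int)
    (d1 d2 : PySem.Dict String (List (String × Int))) :
    player_ids.foldl
      (fun (acc : PySem.Dict String (List (String × Int)) × PySem.Dict String (List (String × Int))) player =>
        if t1.contains player then
          (acc.1.insert ("player_" ++ PySem.Int.toStr player) pvScore, acc.2)
        else if t2.contains player then
          (acc.1, acc.2.insert ("player_" ++ PySem.Int.toStr player) pvScore)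
        else acc)
      (d1, d2)
    = (player_ids.foldl
        (fun d p => if t1.contains p then d.insert ("player_" ++ PySem.Int.toStr p) pvScore else d) d1,
       player_ids.foldl
        (fun d p => if t2.contains p && !t1.contains p then d.insert ("player_" ++ PySem.Int.toStr p) pvScore else d) d2) := by
  induction player_ids generalizing d1 d2 with
  | nil => rfl
  | cons p rest ih =>
      simp only [List.foldl_cons]
      by_cases h1 : t1.contains p = true
      · rw [if_pos h1, ih, if_pos h1,
            if_neg (by rw [h1]; simp : ¬ (t2.contains p && !t1.contains p) = true)]
      · have h1' : t1.contains p = false := Bool.eq_false_iff.mpr h1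
        by_cases h2 : t2.contains p = true
        · rw [if_neg h1, if_pos h2, ih, if_neg h1,
              if_pos (by rw [h2, h1']; rfl : (t2.contains p && !t1.contains p) = true)]
        · have h2' : t2.contains p = false := Bool.eq_false_iff.mpr h2
          rw [if_neg h1, if_neg h2, ih, if_neg h1,
              if_neg (by rw [h2']; simp : ¬ (t2.contains p && !t1.contains p) = true)]

-- a conditional fold is the fold over the filtered list
theorem pv_foldl_if_filter {α β : Type} (f : α → Bool) (step : β → α → β) (l : List α) (d : β) :
    l.foldl (fun d p => if f p then step d p else d) d = (l.filter f).foldl step d := by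
  induction l generalizing d with
  | nil => rfl
  | cons p rest ih =>
      by_cases h : f p = true
      · simp [h, ih]
      · simp [Bool.eq_false_iff.mpr h, ih]

-- every value stored by a constant-value insert loop is pvScore
theorem pv_values_const (l : List String) (d : PySem.Dict String (List (String × Int)))
    (hd : ∀ k w, (k, w) ∈ d.items → w = pvScore) :
    ∀ k w, (k, w) ∈ (l.foldl (fun (d : PySem.Dict String (List (String × Int))) k => d.insert k pvScore) d).items → w = pvScore := by
  induction l generalizing d with
  | nil => exact hd
  | cons x rest ih =>
      intro k w hw
      refine ih (d.insert x pvScore) ?_ k w hw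
      intro k' w' h'
      rcases (PySem.Dict.mem_items_insert _ _ _ _).mp h' with h | h
      · exact congrArg Prod.snd h
      · exact hd k' w' h.1

-- the items of a constant-value insert fold from empty: keys deduped in order, value pvScore
theorem pv_fold_items (l : List String) :
    (l.foldl (fun (d : PySem.Dict String (List (String × Int))) k => d.insert k pvScore) PySem.Dict.empty).items
    = (PySem.List.dedup l).map (fun k => (k, pvScore)) := by
  set d := l.foldl (fun (d : PySem.Dict String (List (String × Int))) k => d.insert k pvScore) PySem.Dict.empty with hd
  have hkeys : d.keys = PySem.List.dedup l := by
    rw [hd, PySem.Dict.keys_foldl_insert, PySem.Dict.keys_empty, PySem.List.dedup_eq_ofList,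
        PySem.Set.ofList_eq_foldl]
    rfl
  have hnd : d.keys.Nodup := by
    rw [hd]; exact PySem.Dict.nodup_keys_foldl_insert l _ _ PySem.Dict.nodup_keys_empty
  have hval : ∀ k w, (k, w) ∈ d.items → w = pvScore := by
    rw [hd]
    exact pv_values_const l PySem.Dict.empty (by simp [PySem.Dict.empty])
  rw [PySem.Dict.items_eq_map_keys d hnd pvScore, hkeys]
  refine List.map_congr_left ?_
  intro k hk
  have hk' : k ∈ d.keys := by rw [hkeys]; exact hk
  obtain ⟨w, hmem⟩ : ∃ w, (k, w) ∈ d.items := by simpa [PySem.Dict.keys] using hk'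
  rw [PySem.Dict.getD_of_mem_items d hmem hnd, hval _ _ hmem]

-- one side of the result, from A's conditional fold to B's dedup-then-fill
theorem pv_side (f : Int → Bool) (ids : List Int) :
    (ids.foldl (fun (d : PySem.Dict String (List (String × Int))) p =>
        if f p then d.insert ("player_" ++ PySem.Int.toStr p) pvScore else d) PySem.Dict.empty).items
    = ((PySem.List.dedup ((ids.filter f).map (fun p => "player_" ++ PySem.Int.toStr p))).foldl
        (fun (d : PySem.Dict String (List (String × Int))) k => d.insert k pvScore) PySem.Dict.empty).items := by
  rw [pv_foldl_if_filter,
      show (ids.filter f).foldl (fun (d : PySem.Dict String (List (String × Int))) p =>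
          d.insert ("player_" ++ PySem.Int.toStr p) pvScore) PySem.Dict.empty
        = ((ids.filter f).map (fun p => "player_" ++ PySem.Int.toStr p)).foldl
            (fun (d : PySem.Dict String (List (String × Int))) k => d.insert k pvScore) PySem.Dict.empty
        from (List.foldl_map (f := fun p => "player_" ++ PySem.Int.toStr p)
            (g := fun (d : PySem.Dict String (List (String × Int))) k => d.insert k pvScore)).symm]
  rw [pv_fold_items, pv_fold_items]
  simp only [PySem.List.dedup_eq_ofList, PySem.Set.ofList_ofList]

-- ===== VERDICT (by name: the statement is the Claim_ definition above) =====
theorem populateTeamLists_spec : Claim_equal_populateTeamLists := by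
  intro player_ids team1 team2 _
  unfold Spec_populateTeamLists populateTeamLists populateTeamLists_alt
  simp only [pv_setContains_ofList, pv_loop_split]
  exact Prod.ext (pv_side _ player_ids) (pv_side _ player_ids)
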